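-- pv_equiv track=rewrite | github.com/aaronxyliu/PTVgen | crawler/2_get_version_files.py | select_file_for_each_version
-- ===== SOURCE A (Python) =====
-- PATTERN_LIST = ['froala_editor.pkgd.min.js', 'froala_editor.min.js']
--
-- PRIORITY_PATTERN = ['.pkgd.js', '.pkgd.min.js']
--
-- def select_file_for_each_version(files, patten_dict):
--     # Return a single file path for each version
--     for pattern in PATTERN_LIST:
--         for filepath in files:
--             filename = filepath[filepath.rfind('/') + 1 :]
--             if filename == pattern:
--                 return filepath
--
--     for pattern in PRIORITY_PATTERN:
--         for filepath in files:
--             if pattern in filepath: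
--                 return filepath
--
--     for pattern in patten_dict:
--         for filepath in files:
--             if valid_webjs(filepath):
--                 filename = filepath[filepath.rfind('/') + 1 :]
--                 filename_body = filename[: filename.find('.')].lower()
--                 if filename_body == pattern:
--                     return filepath
--     return None
--
-- def valid_webjs(filepath):
--     filepath = filepath.lower()
--     invalid_patterns = ['amd/', 'esm/', 'es6/', 'cjs/', '/amd', '/esm', '/es6', '/cjs', 'amd.', 'esm.', 'es6.', 'cjs.', '.amd', '.esm', '.es6', '.cjs']
--     for pattern in invalid_patterns:
--         if pattern in filepath:
--             return False
--     return True
-- ===== SOURCE B (Python) =====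
-- PATTERN_LIST = ['froala_editor.pkgd.min.js', 'froala_editor.min.js']
--
-- PRIORITY_PATTERN = ['.pkgd.js', '.pkgd.min.js']
--
-- INVALID_PATTERNS = ['amd/', 'esm/', 'es6/', 'cjs/', '/amd', '/esm', '/es6', '/cjs',
--                     'amd.', 'esm.', 'es6.', 'cjs.', '.amd', '.esm', '.es6', '.cjs']
--
--
-- def valid_webjs(filepath):
--     low = filepath.lower()
--     return not any(p in low for p in INVALID_PATTERNS)
--
--
-- def _rank(key_rank, filepath):
--     # Numeric priority of a file: 0-1 exact basename match, 2-3 priority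
--     # substring, 4+ patten_dict key match; None if the file scores nowhere.
--     name = filepath[filepath.rfind('/') + 1:]
--     if name in PATTERN_LIST:
--         return PATTERN_LIST.index(name)
--     for i, p in enumerate(PRIORITY_PATTERN):
--         if p in filepath:
--             return 2 + i
--     if valid_webjs(filepath):
--         body = name[:name.find('.')].lower()
--         j = key_rank.get(body)
--         if j is not None:
--             return 4 + j
--     return None
--
--
-- def select_file_for_each_version(files, patten_dict):
--     # Single pass: score every file once, keep the best (lowest) rank,
--     # earliest file wins ties.
--     key_rank = {k: i for i, k in enumerate(patten_dict)}
--     best = None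
--     for fp in files:
--         r = _rank(key_rank, fp)
--         if r is not None and (best is None or r < best[0]):
--             best = (r, fp)
--     return best[1] if best is not None else None
-- ===== Notes on version B (the rewrite author's own statement) =====
-- stated objective: alternative
-- what changed: A makes up to 4+len(patten_dict) prioritized scans over files (one scan per pattern, in priority order); B builds a key->rank dict once, scores each file once with a numeric priority rank and keeps the lowest-ranked earliest file in a single pass over files.
import Mathlib
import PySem

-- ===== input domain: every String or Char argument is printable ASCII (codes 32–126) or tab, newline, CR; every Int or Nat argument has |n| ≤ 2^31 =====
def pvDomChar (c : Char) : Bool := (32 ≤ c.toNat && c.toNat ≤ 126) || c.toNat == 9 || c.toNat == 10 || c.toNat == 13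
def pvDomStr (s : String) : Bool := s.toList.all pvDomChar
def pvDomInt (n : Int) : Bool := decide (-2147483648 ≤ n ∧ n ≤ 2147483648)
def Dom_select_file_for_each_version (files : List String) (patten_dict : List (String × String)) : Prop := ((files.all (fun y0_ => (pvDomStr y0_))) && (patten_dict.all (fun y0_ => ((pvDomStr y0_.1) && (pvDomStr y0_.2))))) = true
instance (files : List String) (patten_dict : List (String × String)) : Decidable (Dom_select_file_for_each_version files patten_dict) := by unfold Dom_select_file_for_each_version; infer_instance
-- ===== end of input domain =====

-- B replaces A's three prioritized repeated scans over `files` with a single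
-- score-then-argmin pass (objective: alternative; same results, one traversal of files).

-- ===== PORT A =====
def pvPATTERN_LIST : List String := ["froala_editor.pkgd.min.js", "froala_editor.min.js"]

def pvPRIORITY_PATTERN : List String := [".pkgd.js", ".pkgd.min.js"]

-- filename = filepath[filepath.rfind('/') + 1 :]   (identical expression in A and B)
def pvFilename (filepath : String) : String :=
  PySem.Str.slice filepath (some (PySem.Str.rfind filepath "/" + 1)) none

-- filename[: filename.find('.')].lower()   (identical expression in A and B)
def pvBody (filename : String) : String :=
  PySem.Str.lower (PySem.Str.slice filename none (some (PySem.Str.find filename ".")))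

def pvInvalidPatterns : List String :=
  ["amd/", "esm/", "es6/", "cjs/", "/amd", "/esm", "/es6", "/cjs",
   "amd.", "esm.", "es6.", "cjs.", ".amd", ".esm", ".es6", ".cjs"]

-- A's valid_webjs: a for-loop with early return False
def pvVwLoop (low : String) : List String → Bool
  | [] => true
  | p :: rest => if PySem.Str.isIn p low then false else pvVwLoop low rest

def valid_webjs (filepath : String) : Bool :=
  pvVwLoop (PySem.Str.lower filepath) pvInvalidPatterns

-- inner loop of phase 1: first file whose basename equals `pattern`
def pvLoop1 (pattern : String) : List String → Option String
  | [] => none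
  | fp :: rest => if pvFilename fp == pattern then some fp else pvLoop1 pattern rest

def pvPhase1 (files : List String) : List String → Option String
  | [] => none
  | p :: ps =>
    match pvLoop1 p files with
    | some fp => some fp
    | none => pvPhase1 files ps

-- inner loop of phase 2: first file containing `pattern`
def pvLoop2 (pattern : String) : List String → Option String
  | [] => none
  | fp :: rest => if PySem.Str.isIn pattern fp then some fp else pvLoop2 pattern rest

def pvPhase2 (files : List String) : List String → Option String
  | [] => none
  | p :: ps =>
    match pvLoop2 p files with
    | some fp => some fp
    | none => pvPhase2 files ps

-- inner loop of phase 3: first valid file whose lowercased name body equals `pattern`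
def pvLoop3 (pattern : String) : List String → Option String
  | [] => none
  | fp :: rest =>
    if valid_webjs fp then
      if pvBody (pvFilename fp) == pattern then some fp else pvLoop3 pattern rest
    else pvLoop3 pattern rest

def pvPhase3 (files : List String) : List String → Option String
  | [] => none
  | p :: ps =>
    match pvLoop3 p files with
    | some fp => some fp
    | none => pvPhase3 files ps

def select_file_for_each_version (files : List String) (patten_dict : List (String × String)) : Option String :=
  match pvPhase1 files pvPATTERN_LIST with
  | some fp => some fp
  | none =>
    match pvPhase2 files pvPRIORITY_PATTERN with
    | some fp => some fp
    | none => pvPhase3 files ((PySem.Dict.ofList patten_dict).keys)  -- `for pattern in patten_dict` iterates dict keys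

-- ===== PORT B =====
-- B's valid_webjs: not any(p in low for p in INVALID_PATTERNS)
def valid_webjs_alt (filepath : String) : Bool :=
  let low := PySem.Str.lower filepath
  ! pvInvalidPatterns.any (fun p => PySem.Str.isIn p low)

-- `for i, p in enumerate(PRIORITY_PATTERN): if p in filepath: return 2 + i`
def pvPriLoop (filepath : String) : List (Nat × String) → Option Nat
  | [] => none
  | (i, p) :: rest => if PySem.Str.isIn p filepath then some (2 + i) else pvPriLoop filepath rest

-- key_rank = {k: i for i, k in enumerate(patten_dict)}  (dict comprehension as a fold of inserts)
def pvKeyRank (keys : List String) : PySem.Dict String Nat :=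
  (PySem.List.enumerate keys).foldl (fun d p => d.insert p.2 p.1.toNat) PySem.Dict.empty

def pvRank (key_rank : PySem.Dict String Nat) (filepath : String) : Option Nat :=
  let name := pvFilename filepath
  match PySem.List.index? pvPATTERN_LIST name with
  | some i => some i
  | none =>
    -- enumerate(PRIORITY_PATTERN) written out as a literal list
    match pvPriLoop filepath [(0, ".pkgd.js"), (1, ".pkgd.min.js")] with
    | some r => some r
    | none =>
      if valid_webjs_alt filepath then
        match key_rank.get? (pvBody name) with
        | some j => some (4 + j)
        | none => none
      else none

def pvStep (key_rank : PySem.Dict String Nat) (best : Option (Nat × String)) (fp : String) : Option (Nat × String) :=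
  match pvRank key_rank fp with
  | none => best
  | some r =>
    match best with
    | none => some (r, fp)
    | some (br, bfp) => if r < br then some (r, fp) else some (br, bfp)

def select_file_for_each_version_alt (files : List String) (patten_dict : List (String × String)) : Option String :=
  let key_rank := pvKeyRank ((PySem.Dict.ofList patten_dict).keys)  -- ranks of the dict's keys, in order
  match files.foldl (pvStep key_rank) none with
  | some (_, fp) => some fp
  | none => none

-- ===== PRECONDITION & SPEC =====
def Spec_select_file_for_each_version (files : List String) (patten_dict : List (String × String)) (out : Option String) : Prop := out = select_file_for_each_version_alt files patten_dict
instance (files : List String) (patten_dict : List (String × String)) (out : Option String) : Decidable (Spec_select_file_for_each_version files patten_dict out) := by unfold Spec_select_file_for_each_version; infer_instance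

-- ===== CLAIM (what is proved, stated in full; the proofs are below) =====
def Claim_equal_select_file_for_each_version : Prop := ∀ (files : List String) (patten_dict : List (String × String)), Dom_select_file_for_each_version files patten_dict → Spec_select_file_for_each_version files patten_dict (select_file_for_each_version files patten_dict)

-- ===== LEMMAS AND PROOFS =====

-- the prioritized list of predicates both programs test, in A's priority order
def pvPred3 (pattern : String) (fp : String) : Bool :=
  valid_webjs fp && (pvBody (pvFilename fp) == pattern)

def pvPreds (keys : List String) : List (String → Bool) :=
  (fun fp => pvFilename fp == "froala_editor.pkgd.min.js") ::
  (fun fp => pvFilename fp == "froala_editor.min.js") ::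
  (fun fp => PySem.Str.isIn ".pkgd.js" fp) ::
  (fun fp => PySem.Str.isIn ".pkgd.min.js" fp) ::
  keys.map pvPred3

-- reference form of A: try the predicates in order, first file matching the first live predicate
def pvSearch (files : List String) : List (String → Bool) → Option String
  | [] => none
  | p :: ps =>
    match files.find? p with
    | some fp => some fp
    | none => pvSearch files ps

-- reference rank of a file and reference fold step
def pvRankS (preds : List (String → Bool)) (fp : String) : Option Nat :=
  preds.findIdx? (fun p => p fp)

def pvStepS (preds : List (String → Bool)) (best : Option (Nat × String)) (fp : String) : Option (Nat × String) :=
  match pvRankS preds fp with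
  | none => best
  | some r =>
    match best with
    | none => some (r, fp)
    | some (br, bfp) => if r < br then some (r, fp) else some (br, bfp)

theorem pvVwLoop_eq (low : String) (l : List String) :
    pvVwLoop low l = ! l.any (fun p => PySem.Str.isIn p low) := by
  induction l with
  | nil => rfl
  | cons p rest ih =>
    simp only [pvVwLoop, List.any_cons]
    cases h : PySem.Str.isIn p low <;> simp [ih]

theorem pv_valid_eq (fp : String) : valid_webjs_alt fp = valid_webjs fp := by
  rw [valid_webjs_alt, valid_webjs, pvVwLoop_eq]

theorem pvLoop1_eq (pattern : String) (files : List String) :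
    pvLoop1 pattern files = files.find? (fun fp => pvFilename fp == pattern) := by
  induction files with
  | nil => rfl
  | cons fp rest ih =>
    simp only [pvLoop1, List.find?]
    cases h : pvFilename fp == pattern <;> simp [ih]

theorem pvLoop2_eq (pattern : String) (files : List String) :
    pvLoop2 pattern files = files.find? (fun fp => PySem.Str.isIn pattern fp) := by
  induction files with
  | nil => rfl
  | cons fp rest ih =>
    simp only [pvLoop2, List.find?]
    cases h : PySem.Str.isIn pattern fp <;> simp [ih]

theorem pvLoop3_eq (pattern : String) (files : List String) :
    pvLoop3 pattern files = files.find? (pvPred3 pattern) := by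
  induction files with
  | nil => rfl
  | cons fp rest ih =>
    simp only [pvLoop3, List.find?, pvPred3]
    cases hv : valid_webjs fp <;> cases hb : pvBody (pvFilename fp) == pattern <;> simp_all

theorem pvPhase3_eq (files : List String) (ks : List String) :
    pvPhase3 files ks = pvSearch files (ks.map pvPred3) := by
  induction ks with
  | nil => rfl
  | cons k ks ih => simp only [pvPhase3, List.map, pvSearch, pvLoop3_eq]; split <;> simp_all

theorem pvA_eq_search (files : List String) (patten_dict : List (String × String)) :
    select_file_for_each_version files patten_dict =
      pvSearch files (pvPreds ((PySem.Dict.ofList patten_dict).keys)) := by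
  simp only [select_file_for_each_version, pvPhase1, pvPhase2, pvPATTERN_LIST,
    pvPRIORITY_PATTERN, pvLoop1_eq, pvLoop2_eq, pvPhase3_eq, pvPreds, pvSearch]
  cases h1 : files.find? (fun fp => pvFilename fp == "froala_editor.pkgd.min.js") <;>
    cases h2 : files.find? (fun fp => pvFilename fp == "froala_editor.min.js") <;>
    cases h3 : files.find? (fun fp => PySem.Str.isIn ".pkgd.js" fp) <;>
    cases h4 : files.find? (fun fp => PySem.Str.isIn ".pkgd.min.js" fp) <;> simp

-- the key-rank dict is the positional index of a duplicate-free key list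
theorem pvKeyRank_aux (keys : List String) (s : Nat) (d : PySem.Dict String Nat) (v : String)
    (hd : ∀ k ∈ keys, d.contains k = false) (hnd : keys.Nodup) :
    ((PySem.List.enumerate keys (s : Int)).foldl (fun d p => d.insert p.2 p.1.toNat) d).get? v =
      match d.get? v with
      | some j => some j
      | none => (PySem.List.index? keys v).map (· + s) := by
  induction keys generalizing s d with
  | nil =>
    simp only [PySem.List.enumerate_nil, List.foldl_nil, PySem.List.index?_eq_idxOf?,
      List.idxOf?, List.findIdx?_nil, Option.map_none]
    cases d.get? v <;> rfl
  | cons k ks ih =>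
    have hk : d.contains k = false := hd k (by simp)
    have hd' : ∀ x ∈ ks, (d.insert k s).contains x = false := by
      intro x hx
      rw [PySem.Dict.contains_insert]
      have hxk : (x == k) = false := by
        simp only [beq_eq_false_iff_ne]
        intro heq; subst heq; exact (List.nodup_cons.mp hnd).1 hx
      simp [hxk, hd x (by simp [hx])]
    have hcast : ((s : Int) + 1) = ((s + 1 : Nat) : Int) := by push_cast; ring
    rw [PySem.List.enumerate_cons, List.foldl_cons]
    simp only [Int.toNat_natCast]
    rw [hcast, ih (s + 1) (d.insert k s) hd' (List.nodup_cons.mp hnd).2]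
    have hdv : d.get? v = none ∨ v ≠ k := by
      by_cases hvk : v = k
      · subst hvk
        left
        cases hg : d.get? v with
        | none => rfl
        | some j =>
          rw [PySem.Dict.contains_eq_isSome_get?, hg] at hk
          simp at hk
      · right; exact hvk
    by_cases hvk : v = k
    · subst hvk
      rcases hdv with hg | hne
      · rw [PySem.Dict.get?_insert_self, hg]
        rw [PySem.List.index?_cons_self]
        simp
      · exact absurd rfl hne
    · have hne : k ≠ v := fun h => hvk h.symm
      rw [PySem.Dict.get?_insert_of_ne]
      · rw [PySem.List.index?_cons_of_ne _ hne]
        cases d.get? v with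
        | some j => rfl
        | none =>
          cases PySem.List.index? ks v with
          | none => simp
          | some j => simp; omega
      · exact fun h => hvk h

theorem pvKeyRank_get? (keys : List String) (hnd : keys.Nodup) (v : String) :
    (pvKeyRank keys).get? v = PySem.List.index? keys v := by
  have := pvKeyRank_aux keys 0 PySem.Dict.empty v (by simp) hnd
  simp only [Int.natCast_zero] at this
  rw [pvKeyRank, this, PySem.Dict.get?_empty]
  cases PySem.List.index? keys v <;> simp

-- B's rank agrees with the reference rank over the predicate list
theorem pvRank_eq (keys : List String) (hnd : keys.Nodup) (fp : String) :
    pvRank (pvKeyRank keys) fp = pvRankS (pvPreds keys) fp := by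
  have hflip : ∀ (a b : String), (a == b) = (b == a) := fun a b => Bool.beq_comm ..
  have hidx : PySem.List.index? pvPATTERN_LIST (pvFilename fp) =
      (if pvFilename fp == "froala_editor.pkgd.min.js" then some 0
       else if pvFilename fp == "froala_editor.min.js" then some 1 else none : Option Nat) := by
    rw [PySem.List.index?_eq_idxOf?]
    simp only [pvPATTERN_LIST, List.idxOf?, List.findIdx?_cons, List.findIdx?_nil, hflip]
    cases h1 : pvFilename fp == "froala_editor.pkgd.min.js" <;>
      cases h2 : pvFilename fp == "froala_editor.min.js" <;> simp
  have hpri : pvPriLoop fp [(0, ".pkgd.js"), (1, ".pkgd.min.js")] =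
      (if PySem.Str.isIn ".pkgd.js" fp then some 2
       else if PySem.Str.isIn ".pkgd.min.js" fp then some 3 else none : Option Nat) := by
    simp only [pvPriLoop]
  have htail :
      (if valid_webjs_alt fp then
        (match (pvKeyRank keys).get? (pvBody (pvFilename fp)) with
         | some j => some (4 + j)
         | none => none)
       else none : Option Nat) =
      (List.findIdx? (fun p => p fp) (keys.map pvPred3)).map (fun i => i + 4) := by
    rw [pvKeyRank_get? keys hnd, List.findIdx?_map, pv_valid_eq]
    have hcomp : ((fun p => p fp) ∘ pvPred3) =
        fun key => valid_webjs fp && (pvBody (pvFilename fp) == key) := by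
      funext key; rfl
    rw [hcomp]
    cases hv : valid_webjs fp with
    | false => simp [List.findIdx?_eq_none_iff]
    | true =>
      simp only [Bool.true_and]
      rw [PySem.List.index?_eq_idxOf?, List.idxOf?]
      rw [show (fun x => x == pvBody (pvFilename fp)) =
            (fun key => pvBody (pvFilename fp) == key) from funext fun x => hflip ..]
      cases hj : List.findIdx? (fun key => pvBody (pvFilename fp) == key) keys <;>
        simp [Nat.add_comm]
  simp only [pvRank, hidx, hpri, htail, pvRankS, pvPreds, List.findIdx?_cons]
  rcases Bool.dichotomy (pvFilename fp == "froala_editor.pkgd.min.js") with h1 | h1 <;> simp only [h1] <;>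
    rcases Bool.dichotomy (pvFilename fp == "froala_editor.min.js") with h2 | h2 <;> simp only [h2] <;>
    rcases Bool.dichotomy (PySem.Str.isIn ".pkgd.js" fp) with h3 | h3 <;> simp only [h3] <;>
    rcases Bool.dichotomy (PySem.Str.isIn ".pkgd.min.js" fp) with h4 | h4 <;> simp only [h4] <;>
      cases hj : List.findIdx? (fun p => p fp) (keys.map pvPred3) <;>
      simp

-- once the best rank is 0, the fold never changes it
theorem pvFold_keep0 (preds : List (String → Bool)) (files : List String) (x : String) :
    files.foldl (pvStepS preds) (some (0, x)) = some (0, x) := by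
  induction files with
  | nil => rfl
  | cons fp rest ih =>
    simp only [List.foldl, pvStepS]
    cases h : pvRankS preds fp <;> simp_all

-- a dead head predicate shifts every rank by one, and the fold commutes with the shift
theorem pvFold_shift (p : String → Bool) (ps : List (String → Bool)) (files : List String)
    (hp : ∀ fp ∈ files, ¬ p fp = true) (acc : Option (Nat × String)) :
    files.foldl (pvStepS (p :: ps)) (acc.map (fun q => (q.1 + 1, q.2))) =
      (files.foldl (pvStepS ps) acc).map (fun q => (q.1 + 1, q.2)) := by
  induction files generalizing acc with
  | nil => rfl
  | cons fp rest ih =>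
    have hfp : p fp = false := by simpa using hp fp (by simp)
    have hrest : ∀ x ∈ rest, ¬ p x = true := fun x hx => hp x (by simp [hx])
    simp only [List.foldl]
    have hstep : pvStepS (p :: ps) (acc.map (fun q => (q.1 + 1, q.2))) fp =
        (pvStepS ps acc fp).map (fun q => (q.1 + 1, q.2)) := by
      simp only [pvStepS, pvRankS, List.findIdx?_cons, hfp, Bool.false_eq_true, if_false]
      cases hr : List.findIdx? (fun q => q fp) ps with
      | none => simp
      | some r =>
        cases acc with
        | none => simp
        | some b =>
          obtain ⟨br, bx⟩ := b
          by_cases hlt : r < br <;> simp [hlt]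
    rw [hstep, ih hrest]

-- the prioritized search equals the score-then-argmin fold
theorem pvSearch_eq_fold (preds : List (String → Bool)) (files : List String) :
    pvSearch files preds = (files.foldl (pvStepS preds) none).map (·.2) := by
  induction preds with
  | nil =>
    have : files.foldl (pvStepS []) none = none := by
      induction files with
      | nil => rfl
      | cons fp rest ih => simpa [List.foldl, pvStepS, pvRankS] using ih
    simp [pvSearch, this]
  | cons p ps ih =>
    cases h : files.find? p with
    | none =>
      have hp : ∀ fp ∈ files, ¬ p fp = true := List.find?_eq_none.mp h
      have := pvFold_shift p ps files hp none
      simp only [Option.map_none] at this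
      simp only [pvSearch, h, ih, this]
      cases files.foldl (pvStepS ps) none <;> simp
    | some fp0 =>
      obtain ⟨hp0, as, bs, rfl, has⟩ := List.find?_eq_some_iff_append.mp h
      have has' : ∀ a ∈ as, ¬ p a = true := by
        intro a ha; simpa using has a ha
      have hpre : as.foldl (pvStepS (p :: ps)) none =
          (as.foldl (pvStepS ps) none).map (fun q => (q.1 + 1, q.2)) := by
        simpa using pvFold_shift p ps as has' none
      have hstep0 : pvStepS (p :: ps) (as.foldl (pvStepS (p :: ps)) none) fp0 = some (0, fp0) := by
        rw [hpre]
        simp only [pvStepS, pvRankS, List.findIdx?_cons, hp0]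
        cases as.foldl (pvStepS ps) none with
        | none => simp
        | some b => simp
      simp only [pvSearch, h, List.foldl_append, List.foldl_cons, hstep0, pvFold_keep0]
      simp

theorem pvStep_eq (keys : List String) (hnd : keys.Nodup) :
    pvStep (pvKeyRank keys) = pvStepS (pvPreds keys) := by
  funext best fp
  simp only [pvStep, pvStepS, pvRank_eq keys hnd]

-- ===== VERDICT (by name: the statement is the Claim_ definition above) =====
theorem select_file_for_each_version_spec : Claim_equal_select_file_for_each_version := by
  intro files patten_dict _
  unfold Spec_select_file_for_each_version
  rw [pvA_eq_search, pvSearch_eq_fold]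
  simp only [select_file_for_each_version_alt,
    pvStep_eq _ (PySem.Dict.nodup_keys_ofList patten_dict)]
  cases files.foldl (pvStepS (pvPreds ((PySem.Dict.ofList patten_dict).keys))) none <;> simp
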